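-- pv_equiv track=rewrite | github.com/siliconfire/music | music-backend/users.py | highest_rank_index
-- ===== SOURCE A (Python) =====
-- RANKS = [
--     "music",
--     "musicpermanent",
--     "moderator",
--     "admin",
--     "superadmin",
--     "dev",
-- ]
--
-- def _rank_index(permission: str) -> int:
--     """Return the rank index (higher is more powerful). Returns -1 if not a known rank."""
--     try:
--         return RANKS.index(permission)
--     except ValueError:
--         return -1
--
-- def highest_rank_index(user: dict) -> int:
--     """Return the highest rank index a user currently has. -1 if none."""
--     perms = user.get("permissions", []) if user else []
--     highest = -1
--     for p in perms:
--         idx = _rank_index(p)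
--         if idx > highest:
--             highest = idx
--     return highest
-- ===== SOURCE B (Python) =====
-- RANKS = [
--     "music",
--     "musicpermanent",
--     "moderator",
--     "admin",
--     "superadmin",
--     "dev",
-- ]
--
-- def highest_rank_index(user: dict) -> int:
--     """Return the highest rank index a user currently has. -1 if none."""
--     perms = user.get("permissions", []) if user else []
--     for i in range(len(RANKS) - 1, -1, -1):
--         if RANKS[i] in perms:
--             return i
--     return -1
-- ===== Notes on version B (the rewrite author's own statement) =====
-- stated objective: alternative
-- what changed: B scans the fixed RANKS table from the highest index downward and returns the first index whose rank name occurs in the user's permissions, instead of A's pass over the permissions with a running-max accumulator of per-permission rank lookups.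
import Mathlib
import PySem

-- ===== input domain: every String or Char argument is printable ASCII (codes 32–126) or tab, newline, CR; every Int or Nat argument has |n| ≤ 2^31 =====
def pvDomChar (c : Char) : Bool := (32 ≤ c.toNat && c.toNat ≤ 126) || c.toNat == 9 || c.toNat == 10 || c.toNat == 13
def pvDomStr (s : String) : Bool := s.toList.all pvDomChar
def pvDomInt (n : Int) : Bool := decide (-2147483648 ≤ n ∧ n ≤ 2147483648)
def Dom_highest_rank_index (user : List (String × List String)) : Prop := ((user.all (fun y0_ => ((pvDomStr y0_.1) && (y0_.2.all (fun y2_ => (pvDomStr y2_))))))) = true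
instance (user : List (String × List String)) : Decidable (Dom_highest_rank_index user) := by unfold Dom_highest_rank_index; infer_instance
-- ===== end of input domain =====

-- B scans the fixed RANKS table from the highest index down and returns the first hit,
-- instead of A's running-max pass over the permissions (alternative decomposition, same cost class).

-- ===== PORT A =====
def RANKS : List String :=
  ["music", "musicpermanent", "moderator", "admin", "superadmin", "dev"]

-- try: return RANKS.index(permission) except ValueError: return -1
def rank_index (permission : String) : Int :=
  match PySem.List.index? RANKS permission with
  | some i => (i : Int)
  | none => -1

def highest_rank_index (user : List (String × List String)) : Int :=
  let perms : List String := if user = [] then [] else PySem.Dict.getD (PySem.Dict.mk user) "permissions" []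
  perms.foldl (fun highest p =>
    let idx := rank_index p
    if idx > highest then idx else highest) (-1)

-- ===== PORT B =====
-- for i in range(len(RANKS)-1, -1, -1): if RANKS[i] in perms: return i / return -1
-- (RANKS[i]: the range indices are always in bounds, so the IndexError branch is unreachable;
--  it is rendered as the getD default, never taken)
def bScan (perms : List String) : List Int → Int
  | [] => -1
  | i :: rest =>
    if (PySem.List.pyGet? RANKS i).getD "" ∈ perms then i else bScan perms rest

def highest_rank_index_alt (user : List (String × List String)) : Int :=
  let perms : List String := if user = [] then [] else PySem.Dict.getD (PySem.Dict.mk user) "permissions" []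
  bScan perms (PySem.List.pyRange ((RANKS.length : Int) - 1) (-1) (-1))

-- ===== PRECONDITION & SPEC =====
def Spec_highest_rank_index (user : List (String × List String)) (out : Int) : Prop := out = highest_rank_index_alt user
instance (user : List (String × List String)) (out : Int) : Decidable (Spec_highest_rank_index user out) := by unfold Spec_highest_rank_index; infer_instance

-- ===== CLAIM (what is proved, stated in full; the proofs are below) =====
def Claim_equal_highest_rank_index : Prop := ∀ (user : List (String × List String)), Dom_highest_rank_index user → Spec_highest_rank_index user (highest_rank_index user)

-- ===== LEMMAS AND PROOFS =====

theorem range_eval : PySem.List.pyRange ((RANKS.length : Int) - 1) (-1) (-1) = [5, 4, 3, 2, 1, 0] := by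
  decide

theorem bScan_eval (perms : List String) :
    bScan perms [5, 4, 3, 2, 1, 0] =
      if "dev" ∈ perms then (5 : Int)
      else if "superadmin" ∈ perms then 4
      else if "admin" ∈ perms then 3
      else if "moderator" ∈ perms then 2
      else if "musicpermanent" ∈ perms then 1
      else if "music" ∈ perms then 0
      else -1 := by
  simp [bScan, RANKS, PySem.List.pyGet?, PySem.List.pyIdx?]

theorem bScan_ge (perms : List String) : -1 ≤ bScan perms [5, 4, 3, 2, 1, 0] := by
  rw [bScan_eval]; split_ifs <;> omega

theorem rank_index_of_not_mem {p : String} (h : p ∉ RANKS) : rank_index p = -1 := by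
  unfold rank_index
  rw [PySem.List.index?_eq_idxOf?]
  simp [List.idxOf?_eq_none_iff.mpr h]

set_option maxHeartbeats 2000000 in
theorem bScan_cons (p : String) (rest : List String) :
    bScan (p :: rest) [5, 4, 3, 2, 1, 0] = max (rank_index p) (bScan rest [5, 4, 3, 2, 1, 0]) := by
  rw [bScan_eval, bScan_eval]
  by_cases h5 : p = "dev"
  · subst h5
    rw [show rank_index "dev" = (5 : Int) by decide]
    simp only [List.mem_cons]
    split_ifs <;> first | omega | simp_all
  by_cases h4 : p = "superadmin"
  · subst h4
    rw [show rank_index "superadmin" = (4 : Int) by decide]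
    simp only [List.mem_cons]
    split_ifs <;> first | omega | simp_all
  by_cases h3 : p = "admin"
  · subst h3
    rw [show rank_index "admin" = (3 : Int) by decide]
    simp only [List.mem_cons]
    split_ifs <;> first | omega | simp_all
  by_cases h2 : p = "moderator"
  · subst h2
    rw [show rank_index "moderator" = (2 : Int) by decide]
    simp only [List.mem_cons]
    split_ifs <;> first | omega | simp_all
  by_cases h1 : p = "musicpermanent"
  · subst h1
    rw [show rank_index "musicpermanent" = (1 : Int) by decide]
    simp only [List.mem_cons]
    split_ifs <;> first | omega | simp_all
  by_cases h0 : p = "music"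
  · subst h0
    rw [show rank_index "music" = (0 : Int) by decide]
    simp only [List.mem_cons]
    split_ifs <;> first | omega | simp_all
  · have hmem : p ∉ RANKS := by
      simp only [RANKS, List.mem_cons, List.not_mem_nil, or_false]
      push Not
      exact ⟨h0, h1, h2, h3, h4, h5⟩
    rw [rank_index_of_not_mem hmem]
    have e5 : ("dev" ∈ p :: rest) ↔ ("dev" ∈ rest) := by simp [List.mem_cons, Ne.symm h5]
    have e4 : ("superadmin" ∈ p :: rest) ↔ ("superadmin" ∈ rest) := by simp [List.mem_cons, Ne.symm h4]
    have e3 : ("admin" ∈ p :: rest) ↔ ("admin" ∈ rest) := by simp [List.mem_cons, Ne.symm h3]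
    have e2 : ("moderator" ∈ p :: rest) ↔ ("moderator" ∈ rest) := by simp [List.mem_cons, Ne.symm h2]
    have e1 : ("musicpermanent" ∈ p :: rest) ↔ ("musicpermanent" ∈ rest) := by simp [List.mem_cons, Ne.symm h1]
    have e0 : ("music" ∈ p :: rest) ↔ ("music" ∈ rest) := by simp [List.mem_cons, Ne.symm h0]
    simp only [e5, e4, e3, e2, e1, e0]
    split_ifs <;> omega

theorem foldA_eq (perms : List String) : ∀ (acc : Int), -1 ≤ acc →
    perms.foldl (fun highest p =>
      let idx := rank_index p
      if idx > highest then idx else highest) acc = max acc (bScan perms [5, 4, 3, 2, 1, 0]) := by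
  induction perms with
  | nil =>
    intro acc hacc
    simp [bScan]
    omega
  | cons p rest ih =>
    intro acc hacc
    rw [List.foldl_cons, bScan_cons]
    have hstep : (let idx := rank_index p
        if idx > acc then idx else acc) = max acc (rank_index p) := by
      simp only []
      split_ifs <;> omega
    rw [hstep, ih (max acc (rank_index p)) (by omega)]
    omega

-- ===== VERDICT (by name: the statement is the Claim_ definition above) =====
theorem highest_rank_index_spec : Claim_equal_highest_rank_index := by
  intro user _
  unfold Spec_highest_rank_index highest_rank_index highest_rank_index_alt
  rw [range_eval]
  have := foldA_eq (if user = [] then [] else PySem.Dict.getD (PySem.Dict.mk user) "permissions" []) (-1) (by omega)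
  simp only [] at this ⊢
  rw [this]
  have := bScan_ge (if user = [] then [] else PySem.Dict.getD (PySem.Dict.mk user) "permissions" [])
  omega
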